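-- pv_equiv track=rewrite | github.com/javmunca/Multilevel-Cyberattacks-Detection | Vista-Controlador/Controlador.py | calculateCriticality
-- ===== SOURCE A (Python) =====
-- def getCriticidadHA(aP1,aP2, aP3): #alta, medio, baja, muy baja.
--
-- 	if aP1 >= 1:
-- 		criticidad = 1
-- 	elif aP2 >= 1:
-- 		criticidad = 2
-- 	elif aP3 >= 1:
-- 		criticidad = 3
-- 	else:
-- 		criticidad = 4
--
--
-- 	return criticidad
--
-- def calculateCriticality(allPriorities):
-- 	countP1 = 0
-- 	countP2 = 0
-- 	countP3 = 0
--
-- 	for a in allPriorities: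
-- 		if a ==1:
-- 			countP1 = countP1+1
-- 		if a ==2:
-- 			countP2 = countP2+1
-- 		if a ==3:
-- 			countP3 = countP3+1
--
-- 	criticality=getCriticidadHA(countP1,countP2, countP3)
--
-- 	return criticality
-- ===== SOURCE B (Python) =====
-- def calculateCriticality(allPriorities):
--     if 1 in allPriorities:
--         return 1
--     if 2 in allPriorities:
--         return 2
--     if 3 in allPriorities:
--         return 3
--     return 4
-- ===== Notes on version B (the rewrite author's own statement) =====
-- stated objective: simpler
-- what changed: Replaces the three-counter counting pass plus helper classification with direct short-circuiting membership tests for 1, 2, 3.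
import Mathlib
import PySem

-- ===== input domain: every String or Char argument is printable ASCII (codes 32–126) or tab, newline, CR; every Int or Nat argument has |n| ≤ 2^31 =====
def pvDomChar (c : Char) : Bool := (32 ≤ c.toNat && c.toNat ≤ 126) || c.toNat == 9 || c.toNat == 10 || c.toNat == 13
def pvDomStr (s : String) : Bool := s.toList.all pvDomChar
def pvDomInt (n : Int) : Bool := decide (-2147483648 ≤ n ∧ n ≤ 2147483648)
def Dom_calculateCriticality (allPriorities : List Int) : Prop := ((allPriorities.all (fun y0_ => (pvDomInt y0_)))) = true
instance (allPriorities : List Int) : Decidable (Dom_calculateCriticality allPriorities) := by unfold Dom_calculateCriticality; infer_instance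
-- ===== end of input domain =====

-- B replaces A's three-counter counting pass with short-circuiting membership tests (simpler, same cost).

-- ===== PORT A =====
def getCriticidadHA (aP1 aP2 aP3 : Int) : Int :=
  if aP1 ≥ 1 then 1
  else if aP2 ≥ 1 then 2
  else if aP3 ≥ 1 then 3
  else 4

def calculateCriticality (allPriorities : List Int) : Int :=
  let counts := allPriorities.foldl
    (fun (c : Int × Int × Int) a =>
      let c := if a = 1 then (c.1 + 1, c.2.1, c.2.2) else c
      let c := if a = 2 then (c.1, c.2.1 + 1, c.2.2) else c
      if a = 3 then (c.1, c.2.1, c.2.2 + 1) else c)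
    (0, 0, 0)
  getCriticidadHA counts.1 counts.2.1 counts.2.2

-- ===== PORT B =====
def calculateCriticality_alt (allPriorities : List Int) : Int :=
  if allPriorities.contains 1 then 1
  else if allPriorities.contains 2 then 2
  else if allPriorities.contains 3 then 3
  else 4

-- ===== PRECONDITION & SPEC =====
def Spec_calculateCriticality (allPriorities : List Int) (out : Int) : Prop := out = calculateCriticality_alt allPriorities
instance (allPriorities : List Int) (out : Int) : Decidable (Spec_calculateCriticality allPriorities out) := by unfold Spec_calculateCriticality; infer_instance

-- ===== CLAIM (what is proved, stated in full; the proofs are below) =====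
def Claim_equal_calculateCriticality : Prop := ∀ (allPriorities : List Int), Dom_calculateCriticality allPriorities → Spec_calculateCriticality allPriorities (calculateCriticality allPriorities)

-- ===== LEMMAS AND PROOFS =====

-- ===== VERDICT (by name: the statement is the Claim_ definition above) =====

theorem counts_inv (l : List Int) (c : Int × Int × Int) :
    (l.foldl
      (fun (c : Int × Int × Int) a =>
        let c := if a = 1 then (c.1 + 1, c.2.1, c.2.2) else c
        let c := if a = 2 then (c.1, c.2.1 + 1, c.2.2) else c
        if a = 3 then (c.1, c.2.1, c.2.2 + 1) else c) c)
    = (c.1 + ((l.filter (· = 1)).length : Int),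
       c.2.1 + ((l.filter (· = 2)).length : Int),
       c.2.2 + ((l.filter (· = 3)).length : Int)) := by
  induction l generalizing c with
  | nil => simp
  | cons a t ih =>
    simp only [List.foldl_cons, List.filter_cons]
    by_cases h1 : a = 1 <;> by_cases h2 : a = 2 <;> by_cases h3 : a = 3 <;>
      simp_all [ih, Prod.ext_iff] <;> omega

theorem filter_len_pos (l : List Int) (v : Int) :
    (1 ≤ ((l.filter (· = v)).length : Int)) ↔ v ∈ l := by
  have h : (1 ≤ ((l.filter (· = v)).length : Int)) ↔ (l.filter (· = v)).length ≠ 0 := by omega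
  rw [h, Ne, List.length_eq_zero_iff, List.filter_eq_nil_iff]
  simp

theorem calculateCriticality_spec : Claim_equal_calculateCriticality := by
  intro l _
  unfold Spec_calculateCriticality calculateCriticality calculateCriticality_alt getCriticidadHA
  simp only [counts_inv, List.contains_eq_mem, zero_add, ge_iff_le, filter_len_pos, decide_eq_true_iff]
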